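-- pv_equiv track=rewrite | github.com/Jaeseed/TIL | Algorithm/programmers/lv3/최고의집합.py | solution
-- ===== SOURCE A (Python) =====
-- def solution(n, s):
--     if n > s:
--         return [-1]
--     mean = s // n
--     remainder = s % n
--     answer = [mean] * n
--     uncleared_cnt = n - 1
--     while uncleared_cnt > 0:
--         new_mean = remainder // uncleared_cnt
--         new_remainder = remainder % uncleared_cnt
--         if new_mean == 0:
--             uncleared_cnt -= 1
--             continue
--         for i in range(n-1, n - 1 - uncleared_cnt, -1):
--             answer[i] += new_mean
--         remainder = new_remainder
--     return answer
-- ===== SOURCE B (Python) =====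
-- def solution(n, s):
--     if n > s:
--         return [-1]
--     mean, remainder = divmod(s, n)
--     return [mean] * (n - remainder) + [mean + 1] * remainder
-- ===== Notes on version B (the rewrite author's own statement) =====
-- stated objective: simpler
-- what changed: Replaces A's iterative remainder-redistribution while/for loops with a single closed-form construction [mean]*(n-r)+[mean+1]*r from divmod(s,n).
import Mathlib
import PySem

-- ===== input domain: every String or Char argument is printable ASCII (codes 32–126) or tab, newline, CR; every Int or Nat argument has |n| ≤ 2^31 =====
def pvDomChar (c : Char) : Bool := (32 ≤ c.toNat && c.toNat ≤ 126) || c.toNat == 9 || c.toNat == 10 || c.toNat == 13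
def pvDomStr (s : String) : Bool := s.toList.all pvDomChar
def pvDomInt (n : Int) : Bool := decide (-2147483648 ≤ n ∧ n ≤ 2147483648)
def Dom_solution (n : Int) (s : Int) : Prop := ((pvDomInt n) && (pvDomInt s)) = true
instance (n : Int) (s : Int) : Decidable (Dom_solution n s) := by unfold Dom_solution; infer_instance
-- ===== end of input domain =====

-- B replaces A's iterative remainder-redistribution loops with the closed form
-- [mean]*(n-r) ++ [mean+1]*r obtained from divmod(s, n); return values agree on Pre_.

-- ===== PORT A =====
-- the while-loop of A; state: (answer, remainder, uncleared_cnt)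
def solLoop (n : Int) (answer : List Int) (remainder : Int) (uc : Int) : List Int :=
  if h : 0 < uc then
    let new_mean := PySem.Int.floordiv remainder uc
    let new_remainder := PySem.Int.mod remainder uc
    if hm : new_mean = 0 then
      solLoop n answer remainder (uc - 1)
    else
      let answer' := (PySem.List.pyRange (n - 1) (n - 1 - uc) (-1)).foldl
        (fun a i => PySem.List.pySetD a i (PySem.List.pyGetD a i 0 + new_mean)) answer
      solLoop n answer' new_remainder uc
  else
    answer
termination_by (uc.toNat, if remainder < 0 then uc.toNat + 1 else remainder.toNat)
decreasing_by
  · exact Prod.Lex.left _ _ (by omega)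
  · refine Prod.Lex.right' _ (by omega) ?_
    have h0 : 0 ≤ PySem.Int.mod remainder uc := PySem.Int.mod_nonneg remainder h
    have h1 : PySem.Int.mod remainder uc < uc := PySem.Int.mod_lt remainder h
    by_cases hr : remainder < 0
    · simp only [if_neg (by omega : ¬ PySem.Int.mod remainder uc < 0), if_pos hr]
      omega
    · -- remainder ≥ 0 and new_mean ≠ 0 ⇒ 1 ≤ remainder // uc ⇒ uc ≤ remainder
      have hge : 0 ≤ PySem.Int.floordiv remainder uc :=
        (PySem.Int.le_floordiv_iff_mul_le h).mpr (by omega)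
      have hne : PySem.Int.floordiv remainder uc ≠ 0 := hm
      have huc : 1 * uc ≤ remainder :=
        (PySem.Int.le_floordiv_iff_mul_le h).mp (by omega)
      simp only [if_neg (by omega : ¬ PySem.Int.mod remainder uc < 0), if_neg hr]
      omega

def solution (n : Int) (s : Int) : List Int :=
  if n > s then [-1]
  else
    let mean := PySem.Int.floordiv s n
    let remainder := PySem.Int.mod s n
    let answer := List.replicate n.toNat mean
    solLoop n answer remainder (n - 1)

-- ===== PORT B =====
def solution_alt (n : Int) (s : Int) : List Int :=
  if n > s then [-1]
  else
    match PySem.Int.divmod? s n with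
    | some (mean, remainder) =>
        List.replicate (n - remainder).toNat mean ++ List.replicate remainder.toNat (mean + 1)
    | none => []  -- unreachable inside Pre_: Python raises ZeroDivisionError here

-- ===== PRECONDITION & SPEC =====
-- Pre_ excludes exactly the inputs where both Pythons raise ZeroDivisionError (n = 0 with n ≤ s).
def Pre_solution (n : Int) (s : Int) : Prop := n ≠ 0 ∨ s < 0
instance (n : Int) (s : Int) : Decidable (Pre_solution n s) := by unfold Pre_solution; infer_instance
def pvWitness_solution : Int × Int := (5, 9)

def Spec_solution (n : Int) (s : Int) (out : List Int) : Prop := out = solution_alt n s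
instance (n : Int) (s : Int) (out : List Int) : Decidable (Spec_solution n s out) := by unfold Spec_solution; infer_instance

-- ===== CLAIM (what is proved, stated in full; the proofs are below) =====
def Claim_equal_solution : Prop := ∀ (n : Int) (s : Int), Dom_solution n s → Pre_solution n s → Spec_solution n s (solution n s)

-- ===== LEMMAS AND PROOFS =====

-- the loop does nothing once remainder = 0
lemma solLoop_zero (n : Int) (a : List Int) (uc : Int) : solLoop n a 0 uc = a := by
  by_cases h : 0 < uc
  · have : uc.toNat ≠ 0 := by omega
    rw [solLoop]
    have h0 : PySem.Int.floordiv 0 uc = 0 := by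
      have := PySem.Int.floordiv_eq_iff_of_pos (a := 0) (b := uc) (q := 0) h
      omega
    simp only [dif_pos h, h0]
    exact solLoop_zero n a (uc - 1)
  · rw [solLoop]; simp [h]
termination_by uc.toNat
decreasing_by omega

-- one step function of A's inner for-loop
def addStep (m : Int) (a : List Int) (i : Int) : List Int :=
  PySem.List.pySetD a i (PySem.List.pyGetD a i 0 + m)

lemma addStep_append (m : Int) (b : List Int) (y : Int) (i : Int)
    (h0 : 0 ≤ i) (h1 : i < (b.length : Int)) :
    addStep m (b ++ [y]) i = addStep m b i ++ [y] := by
  unfold addStep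
  have hi : i.toNat < b.length := by omega
  rw [PySem.List.pySetD_of_nonneg _ _ h0, PySem.List.pySetD_of_nonneg _ _ h0,
      PySem.List.pyGetD_eq_getElem (b ++ [y]) 0 h0 (by simp; omega),
      PySem.List.pyGetD_eq_getElem b 0 h0 (by omega)]
  rw [List.getElem_append_left (by omega)]
  rw [List.set_append_left _ _ hi]

lemma foldl_addStep_append (m : Int) (l : List Int) (b : List Int) (y : Int)
    (hmem : ∀ i ∈ l, 0 ≤ i ∧ i < (b.length : Int)) :
    l.foldl (addStep m) (b ++ [y]) = l.foldl (addStep m) b ++ [y] := by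
  induction l generalizing b with
  | nil => rfl
  | cons i t ih =>
    have hi := hmem i (by simp)
    simp only [List.foldl_cons]
    rw [addStep_append m b y i hi.1 hi.2]
    exact ih _ (fun j hj => by
      have := hmem j (by simp [hj])
      have hl : (addStep m b i).length = b.length := by
        unfold addStep
        rw [PySem.List.pySetD_of_nonneg _ _ hi.1]
        simp
      rw [hl]; exact this)

-- effect of the for-loop: add m to the last j elements
lemma foldl_addStep_suffix (m : Int) (j : Nat) :
    ∀ (a : List Int), j ≤ a.length →
    (PySem.List.pyRange ((a.length : Int) - 1) ((a.length : Int) - 1 - j) (-1)).foldl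
        (addStep m) a
      = a.take (a.length - j) ++ (a.drop (a.length - j)).map (· + m) := by
  induction j with
  | zero =>
    intro a _
    rw [PySem.List.pyRange_neg_one_eq_nil (by omega)]
    simp
  | succ j ih =>
    intro a hj
    obtain ⟨b, x, rfl⟩ : ∃ b x, a = b ++ [x] := by
      rcases List.eq_nil_or_concat a with h | ⟨b, x, h⟩
      · subst h; simp at hj
      · exact ⟨b, x, by simpa using h⟩
    have hL : (b ++ [x]).length = b.length + 1 := by simp
    rw [PySem.List.pyRange_neg_one_cons (by omega)]
    simp only [List.foldl_cons]
    have hstep : addStep m (b ++ [x]) ((b ++ [x]).length - 1) = b ++ [x + m] := by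
      unfold addStep
      rw [hL]
      rw [PySem.List.pySetD_of_nonneg _ _ (by push_cast; omega),
          PySem.List.pyGetD_eq_getElem (b ++ [x]) 0 (by push_cast; omega)
            (by rw [hL]; push_cast; omega)]
      have ht : (((b.length + 1 : Nat) : Int) - 1).toNat = b.length := by omega
      simp only [ht]
      rw [List.getElem_append_right (by omega)]
      simp [List.set_append_right _ _ (le_refl b.length)]
    rw [hstep]
    have hrange : PySem.List.pyRange (((b ++ [x]).length : Int) - 1 - 1)
        (((b ++ [x]).length : Int) - 1 - (j + 1 : Nat)) (-1)
        = PySem.List.pyRange ((b.length : Int) - 1) ((b.length : Int) - 1 - j) (-1) := by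
      rw [hL]; push_cast; ring_nf
    rw [hrange]
    have hjb : j ≤ b.length := by rw [hL] at hj; omega
    rw [foldl_addStep_append m _ b (x + m) (fun i hi => by
      rw [PySem.List.mem_pyRange_neg_one] at hi
      constructor <;> omega)]
    rw [ih b hjb]
    have h1 : (b ++ [x]).length - (j + 1) = b.length - j := by rw [hL]; omega
    have h2 : b.length - j ≤ b.length := by omega
    rw [h1, List.take_append_of_le_length h2, List.drop_append_of_le_length h2]
    simp [List.append_assoc]

-- main loop lemma, for a replicate initial list
lemma solLoop_replicate (mean n : Int) (hn : 0 < n) :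
    ∀ (k : Nat) (rem : Int), (k : Int) ≤ n - 1 → 0 ≤ rem → rem ≤ (k : Int) →
    solLoop n (List.replicate n.toNat mean) rem (k : Int)
      = List.replicate (n.toNat - rem.toNat) mean ++ List.replicate rem.toNat (mean + 1) := by
  intro k
  induction k with
  | zero =>
    intro rem _ h0 h1
    have : rem = 0 := by omega
    subst this
    rw [solLoop]
    simp
  | succ k ih =>
    intro rem hk h0 h1
    have hpos : (0 : Int) < ((k + 1 : Nat) : Int) := by push_cast; omega
    rw [solLoop]
    simp only [dif_pos hpos]
    by_cases hlt : rem < ((k + 1 : Nat) : Int)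
    · have hfd : PySem.Int.floordiv rem ((k + 1 : Nat) : Int) = 0 := by
        have := PySem.Int.floordiv_eq_iff_of_pos (a := rem) (b := ((k + 1 : Nat) : Int)) (q := 0) hpos
        omega
      simp only [hfd]
      have he : ((k + 1 : Nat) : Int) - 1 = (k : Int) := by push_cast; ring
      rw [he]
      exact ih rem (by omega) h0 (by omega)
    · -- rem = k + 1
      have heq : rem = ((k + 1 : Nat) : Int) := by omega
      have hfd : PySem.Int.floordiv rem ((k + 1 : Nat) : Int) = 1 := by
        have := PySem.Int.floordiv_eq_iff_of_pos (a := rem) (b := ((k + 1 : Nat) : Int)) (q := 1) hpos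
        omega
      have hmod : PySem.Int.mod rem ((k + 1 : Nat) : Int) = 0 := by
        rw [heq, PySem.Int.mod_eq_zero_iff_dvd]
      simp only [hfd, hmod]
      rw [solLoop_zero]
      have hlen : ((List.replicate n.toNat mean).length : Int) = n := by
        simp; omega
      have hrange : PySem.List.pyRange (n - 1) (n - 1 - ((k + 1 : Nat) : Int)) (-1)
          = PySem.List.pyRange (((List.replicate n.toNat mean).length : Int) - 1)
              (((List.replicate n.toNat mean).length : Int) - 1 - ((k + 1 : Nat) : Int)) (-1) := by
        rw [hlen]
      have hfold := foldl_addStep_suffix 1 (k + 1) (List.replicate n.toNat mean)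
        (by simp; omega)
      show (PySem.List.pyRange (n - 1) (n - 1 - ((k + 1 : Nat) : Int)) (-1)).foldl (addStep 1) _ = _
      rw [hrange, hfold]
      have hle : k + 1 ≤ n.toNat := by omega
      rw [List.length_replicate, List.take_replicate, List.drop_replicate, List.map_replicate]
      have hrt : rem.toNat = k + 1 := by omega
      rw [hrt]
      congr 1
      · congr 1; omega
      · congr 1; omega

-- ===== VERDICT (by name: the statement is the Claim_ definition above) =====
theorem solution_spec : Claim_equal_solution := by
  intro n s _ hpre
  unfold Spec_solution solution solution_alt
  by_cases hgt : n > s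
  · simp [hgt]
  · simp only [if_neg hgt]
    have hns : n ≤ s := by omega
    have hn0 : n ≠ 0 := by
      rcases hpre with h | h
      · exact h
      · omega
    have hdm : PySem.Int.divmod? s n = some (PySem.Int.floordiv s n, PySem.Int.mod s n) := by
      simp [PySem.Int.divmod?, hn0, PySem.Int.floordiv, PySem.Int.mod]
    rw [hdm]
    change _ = List.replicate (n - PySem.Int.mod s n).toNat (PySem.Int.floordiv s n) ++
      List.replicate (PySem.Int.mod s n).toNat (PySem.Int.floordiv s n + 1)
    by_cases hnpos : 0 < n
    · -- positive n: main loop lemma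
      have hmn : 0 ≤ PySem.Int.mod s n := PySem.Int.mod_nonneg s hnpos
      have hml : PySem.Int.mod s n < n := PySem.Int.mod_lt s hnpos
      have hk : ((n - 1).toNat : Int) = n - 1 := by omega
      have := solLoop_replicate (PySem.Int.floordiv s n) n hnpos (n - 1).toNat
        (PySem.Int.mod s n) (by omega) hmn (by omega)
      rw [hk] at this
      rw [this]
      congr 2
      omega
    · -- negative n: both sides are []
      have hneg : n < 0 := by omega
      have hb := PySem.Int.mod_neg_bounds s hneg
      have h1 : n.toNat = 0 := by omega
      have h2 : (n - PySem.Int.mod s n).toNat = 0 := by omega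
      have h3 : (PySem.Int.mod s n).toNat = 0 := by omega
      rw [h1, h2, h3]
      rw [solLoop]
      rw [dif_neg (by omega : ¬ (0 : Int) < n - 1)]
      simp
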